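-- pv_equiv track=rewrite | github.com/Pallavrai/NPvert | llm_placer.py | _text_to_latex
-- ===== SOURCE A (Python) =====
-- def _text_to_latex(text: str) -> str:
--     """Convert plain text to basic LaTeX."""
--     # Escape special characters
--     text = text.replace('&', '\\&')
--     text = text.replace('%', '\\%')
--     text = text.replace('$', '\\$')
--     text = text.replace('#', '\\#')
--     text = text.replace('_', '\\_')
--     text = text.replace('{', '\\{')
--     text = text.replace('}', '\\}')
--     text = text.replace('~', '\\textasciitilde ')
--     text = text.replace('^', '\\textasciicircum ')
--
--     # Wrap paragraphs
--     paragraphs = [p.strip() for p in text.split('\n\n') if p.strip()]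
--     return '\n\n'.join([f"{p}" for p in paragraphs])
-- ===== SOURCE B (Python) =====
-- def _esc(ch):
--     if ch == '&': return '\\&'
--     if ch == '%': return '\\%'
--     if ch == '$': return '\\$'
--     if ch == '#': return '\\#'
--     if ch == '_': return '\\_'
--     if ch == '{': return '\\{'
--     if ch == '}': return '\\}'
--     if ch == '~': return '\\textasciitilde '
--     if ch == '^': return '\\textasciicircum '
--     return ch
--
--
-- def _text_to_latex(text: str) -> str:
--     """Convert plain text to basic LaTeX."""
--     # Split into paragraphs FIRST (escaping never creates or removes '\n\n'),
--     # then escape each paragraph in one character-level pass, accumulating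
--     # the stripped non-empty results.
--     out = []
--     for para in text.split('\n\n'):
--         escaped = ''.join(_esc(ch) for ch in para)
--         stripped = escaped.strip()
--         if stripped:
--             out.append(stripped)
--     return '\n\n'.join(out)
-- ===== Notes on version B (the rewrite author's own statement) =====
-- stated objective: alternative
-- what changed: B reorders the pipeline: it splits the raw text into paragraphs first and then escapes each paragraph in a single character-level pass through an if-chain escape function with an explicit accumulator loop, instead of A's nine whole-text replace passes followed by a split/strip/filter comprehension; correctness rests on escaping commuting with the split since no escape contains or consumes a newline.
import Mathlib
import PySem

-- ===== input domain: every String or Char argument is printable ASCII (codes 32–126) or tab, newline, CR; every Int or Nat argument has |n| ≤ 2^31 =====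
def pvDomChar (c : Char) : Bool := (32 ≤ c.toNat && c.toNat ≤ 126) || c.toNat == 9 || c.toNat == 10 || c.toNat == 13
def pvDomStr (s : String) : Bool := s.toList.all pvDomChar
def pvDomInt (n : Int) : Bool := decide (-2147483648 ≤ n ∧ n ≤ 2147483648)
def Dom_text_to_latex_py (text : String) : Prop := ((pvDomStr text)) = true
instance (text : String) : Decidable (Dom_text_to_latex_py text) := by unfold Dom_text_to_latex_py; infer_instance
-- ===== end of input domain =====

-- B reorders the pipeline: split the raw text into paragraphs first, then escape each
-- paragraph in one character-level pass with an accumulator loop, instead of A's nine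
-- whole-text replace passes followed by a split/strip/filter comprehension (objective: alternative).

-- ===== PORT A =====
def text_to_latex_py (text : String) : String :=
  let t1 := PySem.Str.replace text "&" "\\&"
  let t2 := PySem.Str.replace t1 "%" "\\%"
  let t3 := PySem.Str.replace t2 "$" "\\$"
  let t4 := PySem.Str.replace t3 "#" "\\#"
  let t5 := PySem.Str.replace t4 "_" "\\_"
  let t6 := PySem.Str.replace t5 "{" "\\{"
  let t7 := PySem.Str.replace t6 "}" "\\}"
  let t8 := PySem.Str.replace t7 "~" "\\textasciitilde "
  let t9 := PySem.Str.replace t8 "^" "\\textasciicircum "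
  -- text.split('\n\n'): sep is the nonempty literal "\n\n", so split? is always `some`
  let paragraphs :=
    (((PySem.Str.split? t9 "\n\n").getD []).filter (fun p => PySem.Str.strip p != "")).map
      (fun p => PySem.Str.strip p)
  PySem.Str.join "\n\n" paragraphs

-- ===== PORT B =====
-- Source B's `_esc`: one character's LaTeX escape, an if-chain
def pvEsc (ch : Char) : String :=
  if ch = '&' then "\\&"
  else if ch = '%' then "\\%"
  else if ch = '$' then "\\$"
  else if ch = '#' then "\\#"
  else if ch = '_' then "\\_"
  else if ch = '{' then "\\{"
  else if ch = '}' then "\\}"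
  else if ch = '~' then "\\textasciitilde "
  else if ch = '^' then "\\textasciicircum "
  else String.ofList [ch]   -- a one-char string: Python just returns ch

def text_to_latex_py_alt (text : String) : String :=
  -- for para in text.split('\n\n'): escape charwise, strip, append if nonempty
  let out := ((PySem.Str.split? text "\n\n").getD []).foldl
    (fun acc para =>
      let escaped := String.ofList (para.toList.flatMap (fun ch => (pvEsc ch).toList))
      let stripped := PySem.Str.strip escaped
      if stripped != "" then acc ++ [stripped] else acc) []
  PySem.Str.join "\n\n" out

-- ===== PRECONDITION & SPEC =====
def Spec_text_to_latex_py (text : String) (out : String) : Prop := out = text_to_latex_py_alt text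
instance (text : String) (out : String) : Decidable (Spec_text_to_latex_py text out) := by unfold Spec_text_to_latex_py; infer_instance

-- ===== CLAIM (what is proved, stated in full; the proofs are below) =====
def Claim_equal_text_to_latex_py : Prop := ∀ (text : String), Dom_text_to_latex_py text → Spec_text_to_latex_py text (text_to_latex_py text)

-- ===== LEMMAS AND PROOFS =====

-- the charwise substitution performed by one single-character replace pass
def pvSub (c : Char) (r : List Char) (x : Char) : List Char := if x = c then r else [x]

-- list-level escape of one char, B's `pvEsc`
def pvEscL (x : Char) : List Char := (pvEsc x).toList

-- an ordinary character escapes to itself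
theorem pvEscL_other (c : Char) (h1 : ¬ c = '&') (h2 : ¬ c = '%') (h3 : ¬ c = '$')
    (h4 : ¬ c = '#') (h5 : ¬ c = '_') (h6 : ¬ c = '{') (h7 : ¬ c = '}') (h8 : ¬ c = '~')
    (h9 : ¬ c = '^') : pvEscL c = [c] := by
  rw [pvEscL, pvEsc]
  simp only [h1, h2, h3, h4, h5, h6, h7, h8, h9, if_false]
  simp

-- replace.go with a single-char pattern substitutes character by character
theorem go_single (c : Char) (r : List Char) :
    ∀ (fuel : Nat) (l acc : List Char), l.length ≤ fuel →
      PySem.Chars.replace.go [c] r fuel l acc = acc.reverse ++ l.flatMap (pvSub c r) := by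
  intro fuel
  induction fuel with
  | zero =>
    intro l acc h
    have : l = [] := List.eq_nil_of_length_eq_zero (Nat.le_zero.mp h)
    subst this
    simp [PySem.Chars.replace.go]
  | succ n ih =>
    intro l acc h
    cases l with
    | nil => simp [PySem.Chars.replace.go]
    | cons x t =>
      rw [PySem.Chars.replace.go]
      by_cases hx : x = c
      · subst hx
        simp only [List.isPrefixOf, beq_self_eq_true, Bool.true_and, if_true]
        rw [ih _ _ (by simpa using Nat.le_of_succ_le_succ h)]
        simp [pvSub]
      · have hbeq : ([c].isPrefixOf (x :: t)) = false := by
          simp [List.isPrefixOf, Ne.symm hx]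
        rw [hbeq]
        simp only [Bool.false_eq_true, if_false]
        rw [ih _ _ (by simpa using Nat.le_of_succ_le_succ h)]
        simp [pvSub, hx]

-- Python's s.replace(old, new) with a one-character old is exactly that substitution
theorem replace_single (l : List Char) (c : Char) (r : List Char) :
    PySem.Chars.replace l [c] r = l.flatMap (pvSub c r) := by
  rw [PySem.Chars.replace]
  simp [go_single c r l.length l [] le_rfl]

-- on a single char, the composition of the nine substitutions is one if-chain escape
set_option maxRecDepth 4000 in
theorem chain_step (x : Char) :
    (((((((((pvSub '&' ['\\', '&'] x).flatMap (pvSub '%' ['\\', '%'])).flatMap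
        (pvSub '$' ['\\', '$'])).flatMap (pvSub '#' ['\\', '#'])).flatMap
        (pvSub '_' ['\\', '_'])).flatMap (pvSub '{' ['\\', '{'])).flatMap
        (pvSub '}' ['\\', '}'])).flatMap
        (pvSub '~' ['\\', 't', 'e', 'x', 't', 'a', 's', 'c', 'i', 'i', 't', 'i', 'l', 'd', 'e', ' '])).flatMap
        (pvSub '^' ['\\', 't', 'e', 'x', 't', 'a', 's', 'c', 'i', 'i', 'c', 'i', 'r', 'c', 'u', 'm', ' ']))
      = pvEscL x := by
  by_cases h1 : x = '&'
  · subst h1; rw [show pvEscL '&' = ['\\', '&'] from rfl]; simp [pvSub]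
  by_cases h2 : x = '%'
  · subst h2; rw [show pvEscL '%' = ['\\', '%'] from rfl]; simp [pvSub]
  by_cases h3 : x = '$'
  · subst h3; rw [show pvEscL '$' = ['\\', '$'] from rfl]; simp [pvSub]
  by_cases h4 : x = '#'
  · subst h4; rw [show pvEscL '#' = ['\\', '#'] from rfl]; simp [pvSub]
  by_cases h5 : x = '_'
  · subst h5; rw [show pvEscL '_' = ['\\', '_'] from rfl]; simp [pvSub]
  by_cases h6 : x = '{'
  · subst h6; rw [show pvEscL '{' = ['\\', '{'] from rfl]; simp [pvSub]
  by_cases h7 : x = '}'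
  · subst h7; rw [show pvEscL '}' = ['\\', '}'] from rfl]; simp [pvSub]
  by_cases h8 : x = '~'
  · subst h8
    rw [show pvEscL '~'
      = ['\\', 't', 'e', 'x', 't', 'a', 's', 'c', 'i', 'i', 't', 'i', 'l', 'd', 'e', ' '] from rfl]
    simp [pvSub]
  by_cases h9 : x = '^'
  · subst h9
    rw [show pvEscL '^'
      = ['\\', 't', 'e', 'x', 't', 'a', 's', 'c', 'i', 'i', 'c', 'i', 'r', 'c', 'u', 'm', ' '] from rfl]
    simp [pvSub]
  rw [pvEscL_other x h1 h2 h3 h4 h5 h6 h7 h8 h9]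
  simp [pvSub, h1, h2, h3, h4, h5, h6, h7, h8, h9]

-- on a whole char list, the nine substitution passes equal one escape pass
theorem chain_list (l : List Char) :
    (((((((((l.flatMap (pvSub '&' ['\\', '&'])).flatMap (pvSub '%' ['\\', '%'])).flatMap
        (pvSub '$' ['\\', '$'])).flatMap (pvSub '#' ['\\', '#'])).flatMap
        (pvSub '_' ['\\', '_'])).flatMap (pvSub '{' ['\\', '{'])).flatMap
        (pvSub '}' ['\\', '}'])).flatMap
        (pvSub '~' ['\\', 't', 'e', 'x', 't', 'a', 's', 'c', 'i', 'i', 't', 'i', 'l', 'd', 'e', ' '])).flatMap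
        (pvSub '^' ['\\', 't', 'e', 'x', 't', 'a', 's', 'c', 'i', 'i', 'c', 'i', 'r', 'c', 'u', 'm', ' ']))
      = l.flatMap pvEscL := by
  induction l with
  | nil => rfl
  | cons x t ih =>
    simp only [List.flatMap_cons, List.flatMap_append]
    rw [ih, chain_step x]

-- A's nine replace passes produce exactly one escape pass over the whole text
theorem escape_eq (text : String) :
    PySem.Str.replace (PySem.Str.replace (PySem.Str.replace (PySem.Str.replace
      (PySem.Str.replace (PySem.Str.replace (PySem.Str.replace (PySem.Str.replace
        (PySem.Str.replace text "&" "\\&") "%" "\\%") "$" "\\$") "#" "\\#") "_" "\\_")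
          "{" "\\{") "}" "\\}") "~" "\\textasciitilde ") "^" "\\textasciicircum "
      = String.ofList (text.toList.flatMap pvEscL) := by
  simp only [PySem.Str.replace, String.toList_ofList]
  refine congrArg String.ofList ?_
  rw [show "&".toList = ['&'] from rfl, show "%".toList = ['%'] from rfl,
    show "$".toList = ['$'] from rfl, show "#".toList = ['#'] from rfl,
    show "_".toList = ['_'] from rfl, show "{".toList = ['{'] from rfl,
    show "}".toList = ['}'] from rfl, show "~".toList = ['~'] from rfl,
    show "^".toList = ['^'] from rfl,
    show "\\&".toList = ['\\', '&'] from rfl, show "\\%".toList = ['\\', '%'] from rfl,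
    show "\\$".toList = ['\\', '$'] from rfl, show "\\#".toList = ['\\', '#'] from rfl,
    show "\\_".toList = ['\\', '_'] from rfl, show "\\{".toList = ['\\', '{'] from rfl,
    show "\\}".toList = ['\\', '}'] from rfl,
    show "\\textasciitilde ".toList
      = ['\\', 't', 'e', 'x', 't', 'a', 's', 'c', 'i', 'i', 't', 'i', 'l', 'd', 'e', ' '] from rfl,
    show "\\textasciicircum ".toList
      = ['\\', 't', 'e', 'x', 't', 'a', 's', 'c', 'i', 'i', 'c', 'i', 'r', 'c', 'u', 'm', ' '] from rfl]
  simp only [replace_single]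
  exact chain_list text.toList

-- reference version of Python's split on the literal '\n\n'
def splitNN (l : List Char) : List (List Char) :=
  match l with
  | [] => [[]]
  | c :: rest =>
    if c = '\n' ∧ rest.head? = some '\n' then [] :: splitNN rest.tail
    else (c :: (splitNN rest).headD []) :: (splitNN rest).tail
termination_by l.length
decreasing_by
  · simp only [List.length_cons, List.length_tail]; omega
  · simp only [List.length_cons]; omega

theorem splitNN_ne_nil (l : List Char) : splitNN l ≠ [] := by
  cases l with
  | nil => simp [splitNN]
  | cons c rest =>
    rw [splitNN]
    split <;> simp

theorem splitNN_cons_eq (l : List Char) :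
    (splitNN l).head?.getD [] :: (splitNN l).tail = splitNN l := by
  cases h : splitNN l with
  | nil => exact absurd h (splitNN_ne_nil l)
  | cons p ps => rfl

-- splitOn.go on sep = '\n\n' computes splitNN
theorem splitOn_go_eq : ∀ (fuel : Nat) (l cur : List Char) (acc : List (List Char)),
    l.length + 1 ≤ fuel →
    PySem.Chars.splitOn.go ['\n', '\n'] fuel l cur acc
      = acc.reverse ++ (cur.reverse ++ (splitNN l).headD []) :: (splitNN l).tail := by
  intro fuel
  induction fuel with
  | zero => intro l cur acc h; omega
  | succ n ih =>
    intro l cur acc h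
    cases l with
    | nil => simp [PySem.Chars.splitOn.go, splitNN]
    | cons c rest =>
      cases rest with
      | nil =>
        have hpre : (['\n', '\n'].isPrefixOf [c]) = false := by
          simp [List.isPrefixOf]
        rw [PySem.Chars.splitOn.go]
        rw [hpre]
        simp only [Bool.false_eq_true, if_false]
        rw [ih [] (c :: cur) acc (by simp only [List.length_cons, List.length_nil] at h ⊢; omega)]
        simp [splitNN]
      | cons d rest2 =>
        by_cases hnn : c = '\n' ∧ d = '\n'
        · obtain ⟨hc, hd⟩ := hnn
          subst hc; subst hd
          have hpre : (['\n', '\n'].isPrefixOf ('\n' :: '\n' :: rest2)) = true := by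
            simp [List.isPrefixOf]
          rw [PySem.Chars.splitOn.go, hpre]
          simp only [if_true]
          have hlen : rest2.length + 1 ≤ n := by
            simp only [List.length_cons] at h; omega
          rw [show List.drop (['\n', '\n'] : List Char).length ('\n' :: '\n' :: rest2) = rest2 from rfl]
          rw [ih rest2 [] ((List.reverse cur) :: acc) hlen]
          rw [show splitNN ('\n' :: '\n' :: rest2) = [] :: splitNN rest2 by
            rw [splitNN]; simp]
          simp only [List.reverse_cons, List.reverse_nil, List.nil_append, List.append_assoc,
            List.tail_cons, List.headD_eq_head?_getD]
          rw [splitNN_cons_eq rest2]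
          simp
        · have hpre : (['\n', '\n'].isPrefixOf (c :: d :: rest2)) = false := by
            simp [List.isPrefixOf]
            exact fun a b => hnn ⟨a.symm, b.symm⟩
          rw [PySem.Chars.splitOn.go, hpre]
          simp only [Bool.false_eq_true, if_false]
          have hlen : (d :: rest2).length + 1 ≤ n := by
            simp only [List.length_cons] at h ⊢; omega
          rw [ih (d :: rest2) (c :: cur) acc hlen]
          rw [show splitNN (c :: d :: rest2)
              = (c :: (splitNN (d :: rest2)).headD []) :: (splitNN (d :: rest2)).tail by
            have : ¬ (c = '\n' ∧ (d :: rest2).head? = some '\n') := by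
              simpa using hnn
            rw [splitNN, if_neg this]]
          simp

theorem splitOn_eq_splitNN (l : List Char) :
    PySem.Chars.splitOn l ['\n', '\n'] = splitNN l := by
  rw [PySem.Chars.splitOn, splitOn_go_eq (l.length + 1) l [] [] le_rfl]
  simp only [List.reverse_nil, List.nil_append, List.headD_eq_head?_getD]
  exact splitNN_cons_eq l

-- prepending a newline-free chunk only extends the first piece
theorem splitNN_append_chunk (chunk : List Char) (h : ∀ x ∈ chunk, x ≠ '\n') :
    ∀ t : List Char, splitNN (chunk ++ t)
      = (chunk ++ (splitNN t).headD []) :: (splitNN t).tail := by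
  induction chunk with
  | nil => intro t; simpa using (splitNN_cons_eq t).symm
  | cons x xs ih =>
    intro t
    have hx : x ≠ '\n' := h x (List.mem_cons_self)
    have hxs : ∀ y ∈ xs, y ≠ '\n' := fun y hy => h y (List.mem_cons_of_mem _ hy)
    rw [List.cons_append, splitNN]
    have hcond : ¬ (x = '\n' ∧ (xs ++ t).head? = some '\n') := fun hc => hx hc.1
    simp only [hcond, if_false]
    rw [ih hxs t]
    simp

-- the escape function maps '\n' to itself and never produces or starts with '\n'
set_option maxRecDepth 4000 in
theorem pvEscL_newline : pvEscL '\n' = ['\n'] := rfl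

set_option maxRecDepth 4000 in
theorem pvEscL_no_newline (c : Char) (h : c ≠ '\n') :
    pvEscL c ≠ [] ∧ ∀ x ∈ pvEscL c, x ≠ '\n' := by
  by_cases h1 : c = '&'
  · subst h1; rw [show pvEscL '&' = ['\\', '&'] from rfl]; exact ⟨by simp, by simp⟩
  by_cases h2 : c = '%'
  · subst h2; rw [show pvEscL '%' = ['\\', '%'] from rfl]; exact ⟨by simp, by simp⟩
  by_cases h3 : c = '$'
  · subst h3; rw [show pvEscL '$' = ['\\', '$'] from rfl]; exact ⟨by simp, by simp⟩
  by_cases h4 : c = '#'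
  · subst h4; rw [show pvEscL '#' = ['\\', '#'] from rfl]; exact ⟨by simp, by simp⟩
  by_cases h5 : c = '_'
  · subst h5; rw [show pvEscL '_' = ['\\', '_'] from rfl]; exact ⟨by simp, by simp⟩
  by_cases h6 : c = '{'
  · subst h6; rw [show pvEscL '{' = ['\\', '{'] from rfl]; exact ⟨by simp, by simp⟩
  by_cases h7 : c = '}'
  · subst h7; rw [show pvEscL '}' = ['\\', '}'] from rfl]; exact ⟨by simp, by simp⟩
  by_cases h8 : c = '~'
  · subst h8
    rw [show pvEscL '~'
      = ['\\', 't', 'e', 'x', 't', 'a', 's', 'c', 'i', 'i', 't', 'i', 'l', 'd', 'e', ' '] from rfl]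
    exact ⟨by simp, by simp⟩
  by_cases h9 : c = '^'
  · subst h9
    rw [show pvEscL '^'
      = ['\\', 't', 'e', 'x', 't', 'a', 's', 'c', 'i', 'i', 'c', 'i', 'r', 'c', 'u', 'm', ' '] from rfl]
    exact ⟨by simp, by simp⟩
  rw [pvEscL_other c h1 h2 h3 h4 h5 h6 h7 h8 h9]
  exact ⟨by simp, by simpa using h⟩

-- the head of the escaped text is '\n' iff the head of the original is
theorem head?_flatMap_newline (l : List Char) :
    ((l.flatMap pvEscL).head? = some '\n') ↔ (l.head? = some '\n') := by
  cases l with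
  | nil => simp
  | cons d rest =>
    by_cases hd : d = '\n'
    · subst hd; simp [pvEscL_newline]
    · obtain ⟨hne, hno⟩ := pvEscL_no_newline d hd
      cases hE : pvEscL d with
      | nil => exact absurd hE hne
      | cons y ys =>
        have hy : y ≠ '\n' := hno y (by rw [hE]; exact List.mem_cons_self)
        simp [hE, hy, hd]

theorem headD_map_flatMap (xs : List (List Char)) :
    ((xs.map (fun p => p.flatMap pvEscL)).headD []) = (xs.headD []).flatMap pvEscL := by
  cases xs <;> simp

-- splitting commutes with escaping: no escape contains or consumes a newline
theorem splitNN_flatMap : ∀ (n : Nat) (l : List Char), l.length ≤ n →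
    splitNN (l.flatMap pvEscL) = (splitNN l).map (fun p => p.flatMap pvEscL) := by
  intro n
  induction n with
  | zero =>
    intro l h
    have : l = [] := List.eq_nil_of_length_eq_zero (Nat.le_zero.mp h)
    subst this; simp [splitNN]
  | succ m ih =>
    intro l h
    cases l with
    | nil => simp [splitNN]
    | cons c rest =>
      by_cases hc : c = '\n'
      · subst hc
        rw [List.flatMap_cons, pvEscL_newline, List.singleton_append]
        cases rest with
        | nil => simp [splitNN, pvEscL_newline]
        | cons d rest2 =>
          by_cases hd : d = '\n'
          · subst hd
            rw [List.flatMap_cons, pvEscL_newline, List.singleton_append]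
            rw [show splitNN ('\n' :: '\n' :: rest2.flatMap pvEscL)
                = [] :: splitNN (rest2.flatMap pvEscL) by rw [splitNN]; simp]
            rw [show splitNN ('\n' :: '\n' :: rest2) = [] :: splitNN rest2 by
              rw [splitNN]; simp]
            rw [ih rest2 (by simp only [List.length_cons] at h; omega)]
            simp
          · -- next char is not a newline: the piece just grows by '\n'
            have hhead : ¬ ((d :: rest2).flatMap pvEscL).head? = some '\n' := by
              rw [head?_flatMap_newline]
              simpa using hd
            have hcond1 : ¬ ('\n' = '\n' ∧ ((d :: rest2).flatMap pvEscL).head? = some '\n') := by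
              tauto
            have hcond2 : ¬ ('\n' = '\n' ∧ (d :: rest2).head? = some '\n') := by
              simpa using hd
            rw [splitNN, if_neg hcond1]
            conv_rhs => rw [splitNN, if_neg hcond2]
            rw [ih (d :: rest2) (by simp only [List.length_cons] at h ⊢; omega)]
            rw [List.map_cons]
            rw [show ((splitNN (d :: rest2)).map (fun p => p.flatMap pvEscL)).headD []
                = ((splitNN (d :: rest2)).headD []).flatMap pvEscL from headD_map_flatMap _]
            rw [List.flatMap_cons, pvEscL_newline, List.singleton_append]
            cases hsp : splitNN (d :: rest2) with
            | nil => exact absurd hsp (splitNN_ne_nil _)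
            | cons p ps => simp
      · obtain ⟨hne, hno⟩ := pvEscL_no_newline c hc
        rw [List.flatMap_cons]
        rw [splitNN_append_chunk (pvEscL c) hno (rest.flatMap pvEscL)]
        rw [ih rest (by simp only [List.length_cons] at h; omega)]
        have hcond : ¬ (c = '\n' ∧ rest.head? = some '\n') := fun hx => hc hx.1
        conv_rhs => rw [splitNN, if_neg hcond]
        rw [List.map_cons]
        rw [show ((splitNN rest).map (fun p => p.flatMap pvEscL)).headD []
            = ((splitNN rest).headD []).flatMap pvEscL from headD_map_flatMap _]
        rw [List.flatMap_cons]
        cases hsp : splitNN rest with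
        | nil => exact absurd hsp (splitNN_ne_nil _)
        | cons p ps => simp

-- a foldl that appends conditionally is a filter-then-map
theorem foldl_if_append {α : Type} (g : α → String) (l : List α) :
    ∀ a : List String,
      l.foldl (fun acc x => if g x != "" then acc ++ [g x] else acc) a
        = a ++ (l.filter (fun x => g x != "")).map g := by
  induction l with
  | nil => intro a; simp
  | cons x t ih =>
    intro a
    by_cases hx : (g x != "") = true
    · rw [List.foldl_cons, if_pos hx, ih, List.filter_cons, if_pos hx]
      simp
    · rw [List.foldl_cons, if_neg (by simpa using hx), ih, List.filter_cons,
        if_neg (by simpa using hx)]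

-- the two pipelines produce the same paragraph list piece by piece
set_option maxHeartbeats 2000000 in
theorem pieces_eq (S : List (List Char)) :
    List.map (fun p => PySem.Str.strip p)
      (List.filter (fun p => PySem.Str.strip p != "")
        (List.map String.ofList (List.map (fun p => p.flatMap pvEscL) S)))
    = List.map (fun para => PySem.Str.strip (String.ofList (para.toList.flatMap (fun ch => (pvEsc ch).toList))))
        (List.filter (fun para => PySem.Str.strip (String.ofList (para.toList.flatMap (fun ch => (pvEsc ch).toList))) != "")
          (List.map String.ofList S)) := by
  simp only [show (fun ch => (pvEsc ch).toList) = pvEscL from rfl]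
  induction S with
  | nil => simp
  | cons p S ih =>
    simp only [List.map_cons, List.filter_cons, String.toList_ofList]
    by_cases h : (PySem.Str.strip (String.ofList (p.flatMap pvEscL)) != "") = true
    · rw [if_pos h, if_pos h]
      simp only [List.map_cons]
      rw [ih, String.toList_ofList]
    · rw [if_neg (by simpa using h), if_neg (by simpa using h)]
      exact ih

-- ===== VERDICT (by name: the statement is the Claim_ definition above) =====
set_option maxRecDepth 4000 in
theorem text_to_latex_py_spec : Claim_equal_text_to_latex_py := by
  intro text _
  show text_to_latex_py text = text_to_latex_py_alt text
  have key : ∀ s : String, (PySem.Str.split? s "\n\n").getD []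
      = (splitNN s.toList).map String.ofList := by
    intro s
    rw [PySem.Str.split?, show ("\n\n" : String).toList = ['\n', '\n'] from rfl,
      PySem.Chars.split?]
    simp [splitOn_eq_splitNN]
  simp only [text_to_latex_py, text_to_latex_py_alt]
  rw [escape_eq, key, key, String.toList_ofList]
  rw [splitNN_flatMap text.toList.length text.toList le_rfl]
  rw [foldl_if_append (fun para : String =>
    PySem.Str.strip (String.ofList (para.toList.flatMap (fun ch => (pvEsc ch).toList)))) _ []]
  rw [List.nil_append]
  exact congrArg (PySem.Str.join "\n\n") (pieces_eq (splitNN text.toList))
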